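-- pv_equiv track=rewrite | github.com/derekgwatson/buz-eta-report | services/export.py | ordered_headers
-- ===== SOURCE A (Python) =====
-- from typing import List, Dict, Iterable, Tuple, Callable, Optional
-- from typing import Any
--
-- PREFERRED_COLS = [
--     "RefNo", "DateScheduled", "ProductionStatus", "ProductionLine",
--     "InventoryItem", "Descn", "Instance", "FixedLine"
-- ]
--
-- def ordered_headers(rows: Iterable[Dict[str, Any]]) -> List[str]:
--     rows = list(rows)
--     if not rows:
--         return PREFERRED_COLS[:]
--     seen: List[str] = []
--     for r in rows:
--         for k in r.keys():
--             if k not in seen: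
--                 seen.append(k)
--     return [c for c in PREFERRED_COLS if c in seen] + [c for c in seen if c not in PREFERRED_COLS]
-- ===== SOURCE B (Python) =====
-- PREFERRED_COLS = [
--     "RefNo", "DateScheduled", "ProductionStatus", "ProductionLine",
--     "InventoryItem", "Descn", "Instance", "FixedLine"
-- ]
--
-- def ordered_headers(rows):
--     rows = list(rows)
--     if not rows:
--         return PREFERRED_COLS[:]
--     # Record the first-occurrence position of every key in one flat enumeration.
--     first = {}
--     pos = 0
--     for r in rows:
--         for k in r.keys():
--             if k not in first:
--                 first[k] = pos
--             pos += 1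
--     return [c for c in PREFERRED_COLS if c in first] + \
--         sorted((k for k in first if k not in PREFERRED_COLS),
--                key=lambda k: first[k])
-- ===== Notes on version B (the rewrite author's own statement) =====
-- stated objective: faster
-- what changed: B records each key's first-occurrence position in a hash map during one flat enumeration, then builds the extras by sorting the non-preferred keys by that position, instead of A's order-preserving seen list with a linear membership scan per key and two trailing filtering passes over it.
import Mathlib
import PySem

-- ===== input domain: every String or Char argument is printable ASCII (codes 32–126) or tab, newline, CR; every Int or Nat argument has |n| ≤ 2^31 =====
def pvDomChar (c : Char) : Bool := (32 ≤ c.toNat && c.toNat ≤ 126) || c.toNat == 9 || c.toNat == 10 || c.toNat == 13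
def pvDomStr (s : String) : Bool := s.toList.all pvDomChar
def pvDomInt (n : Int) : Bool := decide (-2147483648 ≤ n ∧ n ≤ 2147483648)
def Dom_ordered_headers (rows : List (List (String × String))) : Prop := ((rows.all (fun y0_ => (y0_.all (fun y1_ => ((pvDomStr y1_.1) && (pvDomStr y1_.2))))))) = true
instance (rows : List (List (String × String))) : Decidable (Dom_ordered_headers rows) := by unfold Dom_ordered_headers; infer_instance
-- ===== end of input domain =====

-- B replaces A's order-preserving seen list (linear scan per key, two trailing filters)
-- by a first-occurrence-position map and a sort of the non-preferred keys by that position.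

def preferredCols : List String :=
  ["RefNo", "DateScheduled", "ProductionStatus", "ProductionLine",
   "InventoryItem", "Descn", "Instance", "FixedLine"]

-- ===== PORT A =====
def ordered_headers (rows : List (List (String × String))) : List String :=
  if rows = [] then preferredCols
  else
    let seen : List String := rows.foldl (fun seen r =>
      (r.map Prod.fst).foldl (fun seen k =>
        if seen.contains k then seen else seen ++ [k]) seen) []
    (preferredCols.filter (fun c => seen.contains c))
      ++ (seen.filter (fun c => !preferredCols.contains c))

-- ===== PORT B =====
def ordered_headers_alt (rows : List (List (String × String))) : List String :=
  if rows = [] then preferredCols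
  else
    let st : PySem.Dict String Int × Int := rows.foldl (fun st r =>
      (r.map Prod.fst).foldl (fun st k =>
        ((if (PySem.Dict.get? st.1 k).isNone then PySem.Dict.insert st.1 k st.2 else st.1),
         st.2 + 1)) st) (PySem.Dict.empty, 0)
    let first := st.1
    (preferredCols.filter (fun c => (PySem.Dict.get? first c).isSome))
      ++ PySem.List.sorted
           ((PySem.Dict.keys first).filter (fun k => !preferredCols.contains k))
           (fun k => PySem.Dict.getD first k 0) false

-- ===== PRECONDITION & SPEC =====
def Spec_ordered_headers (rows : List (List (String × String))) (out : List String) : Prop := out = ordered_headers_alt rows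
instance (rows : List (List (String × String))) (out : List String) : Decidable (Spec_ordered_headers rows out) := by unfold Spec_ordered_headers; infer_instance

-- ===== CLAIM (what is proved, stated in full; the proofs are below) =====
def Claim_equal_ordered_headers : Prop := ∀ (rows : List (List (String × String))), Dom_ordered_headers rows → Spec_ordered_headers rows (ordered_headers rows)

-- ===== LEMMAS AND PROOFS =====

-- Invariant tying B's (dict, counter) state to A's seen list:
-- the dict's keys ARE the seen list, its values are strictly increasing, all below the counter.
def StInv (seen : List String) (st : PySem.Dict String Int × Int) : Prop :=
  PySem.Dict.keys st.1 = seen ∧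
  (st.1.items.map Prod.snd).Pairwise (· < ·) ∧
  (∀ v ∈ st.1.items.map Prod.snd, v < st.2)

theorem inner_inv (ks : List String) (seen : List String) (st : PySem.Dict String Int × Int)
    (h : StInv seen st) :
    StInv (ks.foldl (fun seen k => if seen.contains k then seen else seen ++ [k]) seen)
      (ks.foldl (fun st k =>
        ((if (PySem.Dict.get? st.1 k).isNone then PySem.Dict.insert st.1 k st.2 else st.1),
         st.2 + 1)) st) := by
  induction ks generalizing seen st with
  | nil => exact h
  | cons k ks ih =>
    obtain ⟨hk, hp, hb⟩ := h
    simp only [List.foldl_cons]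
    by_cases hm : seen.contains k = true
    · have hcont : PySem.Dict.contains st.1 k = true := by
        rw [PySem.Dict.contains_iff_mem_keys, hk]; simpa using hm
      have hsome : (PySem.Dict.get? st.1 k).isNone = false := by
        rw [PySem.Dict.contains_eq_isSome_get?] at hcont
        cases hh : PySem.Dict.get? st.1 k <;> simp_all
      rw [if_pos hm, if_neg (by simp [hsome])]
      exact ih seen (st.1, st.2 + 1) ⟨hk, hp, fun v hv => lt_trans (hb v hv) (by omega)⟩
    · have hcont : PySem.Dict.contains st.1 k = false := by
        have := PySem.Dict.contains_iff_mem_keys st.1 k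
        rw [hk] at this
        cases hh : PySem.Dict.contains st.1 k
        · rfl
        · exact absurd (by simpa using this.mp hh) hm
      have hnone : (PySem.Dict.get? st.1 k).isNone = true := by
        rw [PySem.Dict.contains_eq_isSome_get?] at hcont
        cases hh : PySem.Dict.get? st.1 k <;> simp_all
      have hitems : (PySem.Dict.insert st.1 k st.2).items = st.1.items ++ [(k, st.2)] :=
        PySem.Dict.items_insert_of_not_contains _ _ hcont
      rw [if_neg hm, if_pos hnone]
      refine ih (seen ++ [k]) _ ⟨?_, ?_, ?_⟩
      · simp only [PySem.Dict.keys, hitems, List.map_append] at *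
        simp [hk]
      · simp only [hitems, List.map_append, List.pairwise_append]
        exact ⟨hp, by simp, by simpa using hb⟩
      · intro v hv
        simp only [hitems, List.map_append, List.mem_append] at hv
        rcases hv with hv | hv
        · exact lt_trans (hb v hv) (by omega)
        · simp at hv; omega

theorem outer_inv (rows : List (List (String × String))) (seen : List String)
    (st : PySem.Dict String Int × Int) (h : StInv seen st) :
    StInv (rows.foldl (fun seen r =>
        (r.map Prod.fst).foldl (fun seen k =>
          if seen.contains k then seen else seen ++ [k]) seen) seen)
      (rows.foldl (fun st r =>
        (r.map Prod.fst).foldl (fun st k =>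
          ((if (PySem.Dict.get? st.1 k).isNone then PySem.Dict.insert st.1 k st.2 else st.1),
           st.2 + 1)) st) st) := by
  induction rows generalizing seen st with
  | nil => exact h
  | cons r rows ih =>
    simp only [List.foldl_cons]
    exact ih _ _ (inner_inv _ seen st h)

-- lookups in a nodup-key dict with pairwise-increasing values are pairwise increasing along keys
theorem keys_getD_pairwise (d : PySem.Dict String Int)
    (hn : (PySem.Dict.keys d).Nodup)
    (hp : (d.items.map Prod.snd).Pairwise (· < ·)) :
    (PySem.Dict.keys d).Pairwise (fun a b => PySem.Dict.getD d a 0 < PySem.Dict.getD d b 0) := by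
  have : ∀ p ∈ d.items, PySem.Dict.getD d p.1 0 = p.2 := by
    intro p hp'
    exact PySem.Dict.getD_of_mem_items d (by simpa using hp') hn 0
  have h1 : (PySem.Dict.keys d).Pairwise (fun a b => PySem.Dict.getD d a 0 < PySem.Dict.getD d b 0)
      ↔ (d.items.map (fun p => PySem.Dict.getD d p.1 0)).Pairwise (· < ·) := by
    simp only [PySem.Dict.keys, List.pairwise_map]
  rw [h1]
  have h2 : d.items.map (fun p => PySem.Dict.getD d p.1 0) = d.items.map Prod.snd := by
    apply List.map_congr_left
    intro p hp'
    exact this p hp'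
  rw [h2]; exact hp

theorem nodup_keys_result (rows : List (List (String × String))) :
    (PySem.Dict.keys (rows.foldl (fun st r =>
        (r.map Prod.fst).foldl (fun st k =>
          ((if (PySem.Dict.get? st.1 k).isNone then PySem.Dict.insert st.1 k st.2 else st.1),
           st.2 + 1)) st) (PySem.Dict.empty, (0:Int))).1).Nodup := by
  have inv := outer_inv rows [] (PySem.Dict.empty, 0) ⟨rfl, by simp [PySem.Dict.empty], by simp [PySem.Dict.empty]⟩
  -- keys equal A's seen list, which is nodup by construction
  obtain ⟨hk, _, _⟩ := inv
  rw [hk]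
  -- A's dedup fold is nodup
  have : ∀ (l : List (List (String × String))) (s : List String), s.Nodup →
      (l.foldl (fun seen r => (r.map Prod.fst).foldl (fun seen k =>
        if seen.contains k then seen else seen ++ [k]) seen) s).Nodup := by
    intro l
    induction l with
    | nil => intro s hs; exact hs
    | cons r rs ih =>
      intro s hs
      simp only [List.foldl_cons]
      apply ih
      have : ∀ (ks : List String) (s : List String), s.Nodup →
          (ks.foldl (fun seen k => if seen.contains k then seen else seen ++ [k]) s).Nodup := by
        intro ks
        induction ks with
        | nil => intro s hs; exact hs
        | cons k ks ih2 =>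
          intro s hs
          simp only [List.foldl_cons]
          by_cases hm : s.contains k
          · rw [if_pos hm]; exact ih2 s hs
          · rw [if_neg hm]
            have hk' : k ∉ s := by simpa using hm
            refine ih2 _ ?_
            simp only [List.nodup_append, hs, List.nodup_cons, List.not_mem_nil,
              not_false_iff, List.nodup_nil, and_true, true_and]
            intro a ha b hb
            simp only [List.mem_singleton] at hb
            subst hb
            exact fun h => hk' (h ▸ ha)
      exact this _ s hs
  exact this rows [] (by simp)

-- ===== VERDICT (by name: the statement is the Claim_ definition above) =====
theorem ordered_headers_spec : Claim_equal_ordered_headers := by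
  intro rows _
  unfold Spec_ordered_headers ordered_headers ordered_headers_alt
  by_cases h : rows = []
  · simp [h]
  · simp only [h, if_false]
    have inv := outer_inv rows [] (PySem.Dict.empty, 0) ⟨rfl, by simp [PySem.Dict.empty], by simp [PySem.Dict.empty]⟩
    obtain ⟨hk, hp, _⟩ := inv
    have hn := nodup_keys_result rows
    set st := rows.foldl (fun st r =>
        (r.map Prod.fst).foldl (fun st k =>
          ((if (PySem.Dict.get? st.1 k).isNone then PySem.Dict.insert st.1 k st.2 else st.1),
           st.2 + 1)) st) (PySem.Dict.empty, (0:Int)) with hst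
    set seen := rows.foldl (fun seen r =>
        (r.map Prod.fst).foldl (fun seen k =>
          if seen.contains k then seen else seen ++ [k]) seen) ([] : List String) with hseen
    congr 1
    · -- preferred part: contains in seen ↔ get? isSome
      apply List.filter_congr
      intro c _
      rw [← PySem.Dict.contains_eq_isSome_get?, PySem.Dict.contains_eq_decide_mem_keys, hk]
      simp
    · -- extras: the sort is the identity on the filtered key list
      have hpair := keys_getD_pairwise st.1 hn hp
      have hfil : ((PySem.Dict.keys st.1).filter (fun k => !preferredCols.contains k)).Pairwise
          (fun a b => PySem.Dict.getD st.1 a 0 < PySem.Dict.getD st.1 b 0) :=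
        List.Pairwise.filter _ hpair
      rw [PySem.List.sorted_eq_of_perm_of_pairwise_lt _ _ _ (List.Perm.refl _) hfil, hk]
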